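-- pv_equiv track=rewrite | github.com/utilForever/BOJ | Python/22294 - SMH.py | P5
-- ===== SOURCE A (Python) =====
-- import math
--
-- class Point:
--     def __init__(self, x: int, y: int):
--         self.x = x
--         self.y = y
--
--     @staticmethod
--     def ccw(p1, p2, p3) -> int:
--         x1, y1 = p1.x, p1.y
--         x2, y2 = p2.x, p2.y
--         x3, y3 = p3.x, p3.y
--
--         return (x2 - x1) * (y3 - y1) - (x3 - x1) * (y2 - y1)
--
--     @staticmethod
--     def dist(p1, p2) -> float:
--         return math.hypot(p1.x - p2.x, p1.y - p2.y)
--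
-- def P5(A):
--     n = len(A)
--     heights = [Point(i + 1, int(A[i])) for i in range(n)]
--     ret = 0
--
--     for i in range(n):
--         left = []
--         right = []
--
--         # Left side
--         if i > 0:
--             left.append(i - 1)
--
--             for j in range(i - 2, -1, -1):
--                 if Point.ccw(heights[i], heights[left[-1]], heights[j]) >= 0:
--                     continue
--
--                 left.append(j)
--
--         # Right side
--         if i < n - 1:
--             right.append(i + 1)
--
--             for j in range(i + 2, n):
--                 if Point.ccw(heights[i], heights[right[-1]], heights[j]) <= 0:
--                     continue
--
--                 right.append(j)
--
--         ret = max(ret, len(left) + len(right))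
--
--     return ret
-- ===== SOURCE B (Python) =====
-- def P5(A):
--     # Stateless pairwise formulation: buildings i and j (i < j) see each other
--     # iff every building strictly between lies strictly below the chord i-j.
--     n = len(A)
--
--     def vis(j, i):  # j < i; chord test against every intermediate k
--         return all((k - j) * (A[i] - A[j]) - (i - j) * (A[k] - A[j]) > 0
--                    for k in range(j + 1, i))
--
--     best = 0
--     for i in range(n):
--         cnt = sum(1 for j in range(n)
--                   if j != i and vis(min(i, j), max(i, j)))
--         best = max(best, cnt)
--     return best
-- ===== Notes on version B (the rewrite author's own statement) =====
-- stated objective: alternative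
-- what changed: B replaces A's stateful outward hull scans (which keep a list of visible indices and test each candidate only against the last appended one) by a stateless symmetric characterisation: i and j see each other iff every building strictly between lies strictly below the chord, tested directly with all() over the intermediate indices; B keeps no scan state at all.
import Mathlib
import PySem

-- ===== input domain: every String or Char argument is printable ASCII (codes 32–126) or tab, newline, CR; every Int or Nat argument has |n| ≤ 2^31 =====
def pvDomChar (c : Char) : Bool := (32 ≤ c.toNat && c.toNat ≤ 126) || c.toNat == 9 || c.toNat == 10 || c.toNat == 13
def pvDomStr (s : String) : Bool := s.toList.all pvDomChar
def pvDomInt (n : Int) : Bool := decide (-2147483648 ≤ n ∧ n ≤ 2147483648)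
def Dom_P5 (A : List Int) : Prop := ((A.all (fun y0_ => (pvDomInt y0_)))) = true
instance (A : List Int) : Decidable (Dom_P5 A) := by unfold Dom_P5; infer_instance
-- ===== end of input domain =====

-- ===== PORT A =====
-- B replaces A's stateful hull scans by a stateless pairwise chord test (alternative decomposition; neither side mutates its argument).
def pvCcw (p1 p2 p3 : Int × Int) : Int :=
  (p2.1 - p1.1) * (p3.2 - p1.2) - (p3.1 - p1.1) * (p2.2 - p1.2)

def P5 (A : List Int) : Int :=
  let n : Int := A.length
  let heights : List (Int × Int) := (PySem.List.pyRange 0 n 1).map (fun i => (i + 1, PySem.List.pyGetD A i 0))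
  (PySem.List.pyRange 0 n 1).foldl (fun ret i =>
    let left : List Int :=
      if i > 0 then
        (PySem.List.pyRange (i - 2) (-1) (-1)).foldl (fun left j =>
          if pvCcw (PySem.List.pyGetD heights i (0, 0))
              (PySem.List.pyGetD heights (PySem.List.pyGetD left (-1) 0) (0, 0))
              (PySem.List.pyGetD heights j (0, 0)) ≥ 0 then left
          else left ++ [j]) [i - 1]
      else []
    let right : List Int :=
      if i < n - 1 then
        (PySem.List.pyRange (i + 2) n 1).foldl (fun right j =>
          if pvCcw (PySem.List.pyGetD heights i (0, 0))
              (PySem.List.pyGetD heights (PySem.List.pyGetD right (-1) 0) (0, 0))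
              (PySem.List.pyGetD heights j (0, 0)) ≤ 0 then right
          else right ++ [j]) [i + 1]
      else []
    max ret ((left.length : Int) + (right.length : Int))) 0

-- ===== PORT B =====
-- vis(j, i): every building strictly between j and i lies strictly below the chord j-i
def pvVis (A : List Int) (j i : Int) : Bool :=
  (PySem.List.pyRange (j + 1) i 1).all (fun k =>
    decide ((k - j) * (PySem.List.pyGetD A i 0 - PySem.List.pyGetD A j 0)
      - (i - j) * (PySem.List.pyGetD A k 0 - PySem.List.pyGetD A j 0) > 0))

def P5_alt (A : List Int) : Int :=
  let n : Int := A.length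
  (PySem.List.pyRange 0 n 1).foldl (fun best i =>
    max best (((PySem.List.pyRange 0 n 1).filter
      (fun j => decide (j ≠ i) && pvVis A (min i j) (max i j))).length : Int)) 0

-- ===== PRECONDITION & SPEC =====
def Spec_P5 (A : List Int) (out : Int) : Prop := out = P5_alt A
instance (A : List Int) (out : Int) : Decidable (Spec_P5 A out) := by unfold Spec_P5; infer_instance

-- ===== CLAIM (what is proved, stated in full; the proofs are below) =====
def Claim_equal_P5 : Prop := ∀ (A : List Int), Dom_P5 A → Spec_P5 A (P5 A)


-- ===== LEMMAS AND PROOFS =====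

-- proof-side names for the per-index values of A's port
def pvHeights (A : List Int) : List (Int × Int) :=
  (PySem.List.pyRange 0 (A.length : Int) 1).map (fun i => (i + 1, PySem.List.pyGetD A i 0))

def pvLeftA (A : List Int) (i : Int) : List Int :=
  if i > 0 then
    (PySem.List.pyRange (i - 2) (-1) (-1)).foldl (fun left j =>
      if pvCcw (PySem.List.pyGetD (pvHeights A) i (0, 0))
          (PySem.List.pyGetD (pvHeights A) (PySem.List.pyGetD left (-1) 0) (0, 0))
          (PySem.List.pyGetD (pvHeights A) j (0, 0)) ≥ 0 then left
      else left ++ [j]) [i - 1]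
  else []

def pvRightA (A : List Int) (i : Int) : List Int :=
  if i < (A.length : Int) - 1 then
    (PySem.List.pyRange (i + 2) (A.length : Int) 1).foldl (fun right j =>
      if pvCcw (PySem.List.pyGetD (pvHeights A) i (0, 0))
          (PySem.List.pyGetD (pvHeights A) (PySem.List.pyGetD right (-1) 0) (0, 0))
          (PySem.List.pyGetD (pvHeights A) j (0, 0)) ≤ 0 then right
      else right ++ [j]) [i + 1]
  else []

-- cross product ccw(P_i, P_a, P_b) expressed over list values (P_m = (m+1, A[m]))
def pvCw (A : List Int) (i a b : Int) : Int :=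
  (a - i) * (PySem.List.pyGetD A b 0 - PySem.List.pyGetD A i 0)
    - (b - i) * (PySem.List.pyGetD A a 0 - PySem.List.pyGetD A i 0)

lemma pvCcw_shift (i la j ai ala aj : Int) :
    pvCcw (i + 1, ai) (la + 1, ala) (j + 1, aj)
      = (la - i) * (aj - ai) - (j - i) * (ala - ai) := by
  simp only [pvCcw]; ring

lemma pvHeights_get (A : List Int) (i : Int) (h0 : 0 ≤ i) (h1 : i < (A.length : Int)) :
    PySem.List.pyGetD (pvHeights A) i (0, 0) = (i + 1, PySem.List.pyGetD A i 0) := by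
  unfold pvHeights
  exact PySem.List.pyGetD_map_pyRange_of_nonneg _ _ _ _ h0 h1

lemma pvSingletonLast (x : Int) : PySem.List.pyGetD [x] (-1) 0 = x := by
  simpa using PySem.List.pyGetD_neg_one_append_singleton (xs := ([] : List Int)) (x := x) (d := 0)

lemma pvVis_left_iff (A : List Int) (j i : Int) :
    pvVis A j i = true ↔ ∀ k : Int, j < k → k < i → pvCw A i k j < 0 := by
  unfold pvVis
  rw [List.all_eq_true]
  constructor
  · intro h k h1 h2
    have hmem : k ∈ PySem.List.pyRange (j + 1) i 1 := PySem.List.mem_pyRange_one.mpr ⟨by omega, h2⟩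
    have := h k hmem
    rw [decide_eq_true_iff] at this
    have hEq : (k - j) * (PySem.List.pyGetD A i 0 - PySem.List.pyGetD A j 0)
        - (i - j) * (PySem.List.pyGetD A k 0 - PySem.List.pyGetD A j 0) = -(pvCw A i k j) := by
      unfold pvCw; ring
    linarith [hEq ▸ this]
  · intro h k hmem
    obtain ⟨h1, h2⟩ := PySem.List.mem_pyRange_one.mp hmem
    rw [decide_eq_true_iff]
    have := h k (by omega) h2
    have hEq : (k - j) * (PySem.List.pyGetD A i 0 - PySem.List.pyGetD A j 0)
        - (i - j) * (PySem.List.pyGetD A k 0 - PySem.List.pyGetD A j 0) = -(pvCw A i k j) := by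
      unfold pvCw; ring
    rw [hEq]; linarith

lemma pvVis_right_iff (A : List Int) (i j : Int) :
    pvVis A i j = true ↔ ∀ k : Int, i < k → k < j → 0 < pvCw A i k j := by
  unfold pvVis
  rw [List.all_eq_true]
  constructor
  · intro h k h1 h2
    have hmem : k ∈ PySem.List.pyRange (i + 1) j 1 := PySem.List.mem_pyRange_one.mpr ⟨by omega, h2⟩
    have := h k hmem
    rw [decide_eq_true_iff] at this
    have hEq : (k - i) * (PySem.List.pyGetD A j 0 - PySem.List.pyGetD A i 0)
        - (j - i) * (PySem.List.pyGetD A k 0 - PySem.List.pyGetD A i 0) = pvCw A i k j := by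
      unfold pvCw; ring
    linarith [hEq ▸ this]
  · intro h k hmem
    obtain ⟨h1, h2⟩ := PySem.List.mem_pyRange_one.mp hmem
    rw [decide_eq_true_iff]
    have := h k (by omega) h2
    have hEq : (k - i) * (PySem.List.pyGetD A j 0 - PySem.List.pyGetD A i 0)
        - (j - i) * (PySem.List.pyGetD A k 0 - PySem.List.pyGetD A i 0) = pvCw A i k j := by
      unfold pvCw; ring
    rw [hEq]; linarith

-- left scan invariant: A's left loop, from remaining range [m-1 .. 0], counts the visible j
lemma pvLeftScan (A : List Int) (i : Int) (hi : i < (A.length : Int)) :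
    ∀ (m : Nat) (l : List Int) (last : Int),
      l ≠ [] →
      PySem.List.pyGetD l (-1) 0 = last →
      (m : Int) ≤ last → last < i →
      (∀ k : Int, (m : Int) ≤ k → k < i → 0 ≤ pvCw A i last k) →
      (l.length : Int) = ((PySem.List.pyRange (m : Int) i 1).countP (fun j => pvVis A j i) : Int) →
      (((PySem.List.pyRange ((m : Int) - 1) (-1) (-1)).foldl (fun left j =>
          if pvCcw (PySem.List.pyGetD (pvHeights A) i (0, 0))
              (PySem.List.pyGetD (pvHeights A) (PySem.List.pyGetD left (-1) 0) (0, 0))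
              (PySem.List.pyGetD (pvHeights A) j (0, 0)) ≥ 0 then left
          else left ++ [j]) l).length : Int)
        = ((PySem.List.pyRange 0 i 1).countP (fun j => pvVis A j i) : Int) := by
  intro m
  induction m with
  | zero =>
    intro l last _ _ _ _ _ hlen
    rw [PySem.List.pyRange_neg_one_eq_nil (by omega)]
    simpa using hlen
  | succ m ih =>
    intro l last hne hlast hml hli hinv hlen
    have hm1 : ((m + 1 : Nat) : Int) - 1 = (m : Int) := by push_cast; ring
    rw [hm1, PySem.List.pyRange_neg_one_cons (by omega), List.foldl_cons]
    have h0last : 0 ≤ last := by omega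
    have hH : pvCcw (PySem.List.pyGetD (pvHeights A) i (0, 0))
        (PySem.List.pyGetD (pvHeights A) (PySem.List.pyGetD l (-1) 0) (0, 0))
        (PySem.List.pyGetD (pvHeights A) (m : Int) (0, 0)) = pvCw A i last (m : Int) := by
      rw [hlast, pvHeights_get A i (by omega) hi, pvHeights_get A last h0last (by omega),
          pvHeights_get A (m : Int) (by omega) (by omega), pvCcw_shift]
      unfold pvCw; ring
    by_cases hc : 0 ≤ pvCw A i last (m : Int)
    · -- skip: m is not visible from i (last blocks it)
      rw [if_pos (by rw [hH]; exact hc)]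
      have hnotvis : pvVis A (m : Int) i = false := by
        rw [Bool.eq_false_iff]
        intro hv
        have := (pvVis_left_iff A (m : Int) i).mp hv last (by omega) hli
        linarith
      refine ih l last hne hlast (by omega) hli ?_ ?_
      · intro k hk1 hk2
        rcases eq_or_lt_of_le hk1 with hk | hk
        · rw [← hk]; exact hc
        · exact hinv k (by push_cast; omega) hk2
      · rw [PySem.List.pyRange_one_cons (show (m : Int) < i by omega), List.countP_cons,
            hnotvis, if_neg (by simp)]
        push_cast at hlen ⊢
        omega
    · -- append: m is visible from i
      rw [if_neg (by rw [hH]; omega)]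
      have hlt : pvCw A i last (m : Int) < 0 := by omega
      have key : ∀ k : Int, (m : Int) < k → k < i → pvCw A i k (m : Int) < 0 := by
        intro k hk1 hk2
        have hinvk : 0 ≤ pvCw A i last k := hinv k (by push_cast; omega) hk2
        have hid : pvCw A i k (m : Int) * (last - i)
            = pvCw A i last (m : Int) * (k - i) - pvCw A i last k * ((m : Int) - i) := by
          unfold pvCw; ring
        have h1 : 0 < pvCw A i last (m : Int) * (k - i) :=
          mul_pos_of_neg_of_neg hlt (by omega)
        have h2 : pvCw A i last k * ((m : Int) - i) ≤ 0 :=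
          mul_nonpos_of_nonneg_of_nonpos hinvk (by omega)
        have h3 : 0 < pvCw A i k (m : Int) * (last - i) := by rw [hid]; linarith
        by_contra h
        rw [not_lt] at h
        nlinarith
      have hvis : pvVis A (m : Int) i = true :=
        (pvVis_left_iff A (m : Int) i).mpr key
      refine ih (l ++ [(m : Int)]) (m : Int) (by simp)
          (PySem.List.pyGetD_neg_one_append_singleton l _ 0) (by omega) (by omega) ?_ ?_
      · intro k hk1 hk2
        rcases eq_or_lt_of_le hk1 with hk | hk
        · have : pvCw A i (m : Int) (m : Int) = 0 := by unfold pvCw; ring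
          rw [← hk, this]
        · have hkm := key k hk hk2
          have : pvCw A i (m : Int) k = -pvCw A i k (m : Int) := by unfold pvCw; ring
          rw [this]; omega
      · rw [PySem.List.pyRange_one_cons (show (m : Int) < i by omega), List.countP_cons,
            hvis, if_pos rfl]
        simp only [List.length_append, List.length_cons, List.length_nil]
        push_cast at hlen ⊢
        omega

-- right scan invariant: A's right loop, from remaining range [t .. n-1], counts the visible j
lemma pvRightScan (A : List Int) (i : Int) (hi0 : 0 ≤ i) :
    ∀ (m : Nat) (t : Int) (l : List Int) (last : Int),
      (A.length : Int) - t ≤ (m : Int) →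
      t ≤ (A.length : Int) →
      l ≠ [] → PySem.List.pyGetD l (-1) 0 = last →
      i < last → last < t →
      (∀ k : Int, i < k → k < t → pvCw A i last k ≤ 0) →
      (l.length : Int) = ((PySem.List.pyRange (i + 1) t 1).countP (fun j => pvVis A i j) : Int) →
      (((PySem.List.pyRange t (A.length : Int) 1).foldl (fun right j =>
          if pvCcw (PySem.List.pyGetD (pvHeights A) i (0, 0))
              (PySem.List.pyGetD (pvHeights A) (PySem.List.pyGetD right (-1) 0) (0, 0))
              (PySem.List.pyGetD (pvHeights A) j (0, 0)) ≤ 0 then right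
          else right ++ [j]) l).length : Int)
        = ((PySem.List.pyRange (i + 1) (A.length : Int) 1).countP (fun j => pvVis A i j) : Int) := by
  intro m
  induction m with
  | zero =>
    intro t l last hfuel htn hne hlast hil hlt hinv hlen
    have ht : t = (A.length : Int) := by push_cast at hfuel; omega
    rw [ht] at hlen ⊢
    rw [PySem.List.pyRange_one_eq_nil (by omega)]
    simpa using hlen
  | succ m ih =>
    intro t l last hfuel htn hne hlast hil hlt hinv hlen
    by_cases htlt : t < (A.length : Int)
    · rw [PySem.List.pyRange_one_cons htlt, List.foldl_cons]
      have hH : pvCcw (PySem.List.pyGetD (pvHeights A) i (0, 0))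
          (PySem.List.pyGetD (pvHeights A) (PySem.List.pyGetD l (-1) 0) (0, 0))
          (PySem.List.pyGetD (pvHeights A) t (0, 0)) = pvCw A i last t := by
        rw [hlast, pvHeights_get A i hi0 (by omega), pvHeights_get A last (by omega) (by omega),
            pvHeights_get A t (by omega) htlt, pvCcw_shift]
        unfold pvCw; ring
      by_cases hc : pvCw A i last t ≤ 0
      · -- skip: t is not visible from i (last blocks it)
        rw [if_pos (by rw [hH]; exact hc)]
        have hnotvis : pvVis A i t = false := by
          rw [Bool.eq_false_iff]
          intro hv
          have := (pvVis_right_iff A i t).mp hv last hil hlt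
          linarith
        refine ih (t + 1) l last (by push_cast at hfuel ⊢; omega) (by omega) hne hlast hil
            (by omega) ?_ ?_
        · intro k hk1 hk2
          rcases eq_or_lt_of_le (show k ≤ t by omega) with hk | hk
          · rw [hk]; exact hc
          · exact hinv k hk1 (by omega)
        · rw [PySem.List.pyRange_one_succ_right (by omega), List.countP_append, List.countP_cons]
          rw [hnotvis]
          push_cast
          push_cast at hlen
          simp [hlen]
      · -- append: t is visible from i
        rw [if_neg (by rw [hH]; omega)]
        have hgt : 0 < pvCw A i last t := by omega
        have key : ∀ k : Int, i < k → k < t → 0 < pvCw A i k t := by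
          intro k hk1 hk2
          have hinvk : pvCw A i last k ≤ 0 := hinv k hk1 hk2
          have hid : pvCw A i k t * (last - i)
              = pvCw A i last t * (k - i) - pvCw A i last k * (t - i) := by
            unfold pvCw; ring
          have h1 : 0 < pvCw A i last t * (k - i) := mul_pos hgt (by omega)
          have h2 : pvCw A i last k * (t - i) ≤ 0 :=
            mul_nonpos_of_nonpos_of_nonneg hinvk (by omega)
          have h3 : 0 < pvCw A i k t * (last - i) := by rw [hid]; linarith
          by_contra h
          rw [not_lt] at h
          nlinarith
        have hvis : pvVis A i t = true := (pvVis_right_iff A i t).mpr key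
        refine ih (t + 1) (l ++ [t]) t (by push_cast at hfuel ⊢; omega) (by omega) (by simp)
            (PySem.List.pyGetD_neg_one_append_singleton l _ 0) (by omega) (by omega) ?_ ?_
        · intro k hk1 hk2
          rcases eq_or_lt_of_le (show k ≤ t by omega) with hk | hk
          · have : pvCw A i t t = 0 := by unfold pvCw; ring
            rw [hk, this]
          · have hkt := key k hk1 hk
            have : pvCw A i t k = -pvCw A i k t := by unfold pvCw; ring
            rw [this]; omega
        · rw [PySem.List.pyRange_one_succ_right (by omega), List.countP_append, List.countP_cons]
          rw [hvis, List.length_append]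
          push_cast
          push_cast at hlen
          simp [hlen]
    · have ht : t = (A.length : Int) := by omega
      rw [ht] at hlen ⊢
      rw [PySem.List.pyRange_one_eq_nil (by omega)]
      simpa using hlen

lemma pvLeftA_len (A : List Int) (i : Int) (h0 : 0 ≤ i) (hi : i < (A.length : Int)) :
    ((pvLeftA A i).length : Int)
      = ((PySem.List.pyRange 0 i 1).countP (fun j => pvVis A j i) : Int) := by
  by_cases hip : 0 < i
  · unfold pvLeftA
    rw [if_pos hip]
    have hm : ((i - 1).toNat : Int) = i - 1 := Int.toNat_of_nonneg (by omega)
    have hstart : (i - 2 : Int) = ((i - 1).toNat : Int) - 1 := by omega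
    rw [hstart]
    refine pvLeftScan A i hi (i - 1).toNat [i - 1] (i - 1) (by simp)
        (pvSingletonLast _) (by omega) (by omega) ?_ ?_
    · intro k hk1 hk2
      have hk : k = i - 1 := by omega
      have : pvCw A i (i - 1) (i - 1) = 0 := by unfold pvCw; ring
      rw [hk, this]
    · have hvis : pvVis A (i - 1) i = true := by
        rw [pvVis_left_iff]
        intro k hk1 hk2
        omega
      rw [hm, PySem.List.pyRange_one_cons (by omega), PySem.List.pyRange_one_eq_nil (by omega)]
      simp [hvis]
  · have hi0 : i = 0 := by omega
    rw [hi0]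
    unfold pvLeftA
    rw [if_neg (by omega), PySem.List.pyRange_one_eq_nil (by omega)]
    simp

lemma pvRightA_len (A : List Int) (i : Int) (h0 : 0 ≤ i) (hi : i < (A.length : Int)) :
    ((pvRightA A i).length : Int)
      = ((PySem.List.pyRange (i + 1) (A.length : Int) 1).countP (fun j => pvVis A i j) : Int) := by
  by_cases hip : i < (A.length : Int) - 1
  · unfold pvRightA
    rw [if_pos hip]
    refine pvRightScan A i h0 ((A.length : Int) - (i + 2)).toNat (i + 2) [i + 1] (i + 1)
        (by rw [Int.toNat_of_nonneg (by omega)]) (by omega) (by simp)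
        (pvSingletonLast _) (by omega) (by omega) ?_ ?_
    · intro k hk1 hk2
      have hk : k = i + 1 := by omega
      have : pvCw A i (i + 1) (i + 1) = 0 := by unfold pvCw; ring
      rw [hk, this]
    · have hvis : pvVis A i (i + 1) = true := by
        rw [pvVis_right_iff]
        intro k hk1 hk2
        omega
      rw [PySem.List.pyRange_one_cons (by omega), PySem.List.pyRange_one_eq_nil (by omega)]
      simp [hvis]
  · unfold pvRightA
    rw [if_neg hip, PySem.List.pyRange_one_eq_nil (by omega)]
    simp

lemma pvCount_eq (A : List Int) (i : Int) (h0 : 0 ≤ i) (hi : i < (A.length : Int)) :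
    ((pvLeftA A i).length : Int) + ((pvRightA A i).length : Int)
      = (((PySem.List.pyRange 0 (A.length : Int) 1).filter
          (fun j => decide (j ≠ i) && pvVis A (min i j) (max i j))).length : Int) := by
  rw [PySem.List.pyRange_one_append 0 i (A.length : Int) h0 (by omega),
      PySem.List.pyRange_one_cons hi, List.filter_append, List.filter_cons]
  have hii : (decide (i ≠ i) && pvVis A (min i i) (max i i)) = false := by simp
  rw [hii]
  have hleft : (PySem.List.pyRange 0 i 1).filter
      (fun j => decide (j ≠ i) && pvVis A (min i j) (max i j))
      = (PySem.List.pyRange 0 i 1).filter (fun j => pvVis A j i) := by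
    apply List.filter_congr
    intro j hj
    obtain ⟨hj1, hj2⟩ := PySem.List.mem_pyRange_one.mp hj
    have h1 : min i j = j := by omega
    have h2 : max i j = i := by omega
    simp [h1, h2, show j ≠ i by omega]
  have hright : (PySem.List.pyRange (i + 1) (A.length : Int) 1).filter
      (fun j => decide (j ≠ i) && pvVis A (min i j) (max i j))
      = (PySem.List.pyRange (i + 1) (A.length : Int) 1).filter (fun j => pvVis A i j) := by
    apply List.filter_congr
    intro j hj
    obtain ⟨hj1, hj2⟩ := PySem.List.mem_pyRange_one.mp hj
    have h1 : min i j = i := by omega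
    have h2 : max i j = j := by omega
    simp [h1, h2, show j ≠ i by omega]
  rw [hleft, hright]
  simp only [Bool.false_eq_true, if_false, List.length_append, ← List.countP_eq_length_filter]
  rw [pvLeftA_len A i h0 hi, pvRightA_len A i h0 hi]
  push_cast
  ring

lemma pvP5_eq (A : List Int) :
    P5 A = (PySem.List.pyRange 0 (A.length : Int) 1).foldl (fun ret i =>
      max ret (((pvLeftA A i).length : Int) + ((pvRightA A i).length : Int))) 0 := rfl

lemma pvP5_alt_eq (A : List Int) :
    P5_alt A = (PySem.List.pyRange 0 (A.length : Int) 1).foldl (fun best i =>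
      max best (((PySem.List.pyRange 0 (A.length : Int) 1).filter
        (fun j => decide (j ≠ i) && pvVis A (min i j) (max i j))).length : Int)) 0 := rfl

-- ===== VERDICT (by name: the statement is the Claim_ definition above) =====
theorem P5_spec : Claim_equal_P5 := by
  intro A _
  show P5 A = P5_alt A
  rw [pvP5_eq, pvP5_alt_eq]
  apply PySem.List.foldl_congr_mem
  intro acc x hx
  obtain ⟨hx1, hx2⟩ := PySem.List.mem_pyRange_one.mp hx
  rw [pvCount_eq A x hx1 hx2]
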